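-- pv_equiv track=rewrite | github.com/bernikr/advent-of-code | 2019/24.py | part2
-- ===== SOURCE A (Python) =====
-- from itertools import chain
--
-- def get_recursive_neighbors(x, y, d):
--     neighbors = list(filter(lambda c: 0 <= c[0] < 5 and 0 <= c[1] < 5 and not c[:2] == (2, 2),
--                             [(x - 1, y, d), (x + 1, y, d), (x, y - 1, d), (x, y + 1, d)]))
--     if x == 0:
--         neighbors.append((1, 2, d - 1))
--     if x == 4:
--         neighbors.append((3, 2, d - 1))
--     if y == 0:
--         neighbors.append((2, 1, d - 1))
--     if y == 4:
--         neighbors.append((2, 3, d - 1))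
--     if (x, y) == (2, 1):
--         neighbors += [(i, 0, d + 1) for i in range(5)]
--     if (x, y) == (2, 3):
--         neighbors += [(i, 4, d + 1) for i in range(5)]
--     if (x, y) == (1, 2):
--         neighbors += [(0, i, d + 1) for i in range(5)]
--     if (x, y) == (3, 2):
--         neighbors += [(4, i, d + 1) for i in range(5)]
--     return neighbors
--
-- def part2(inp):
--     bugs = {(i % 5, i // 5, 0) for i, c in enumerate(inp) if c == '#'}
--     for _ in range(200):
--         poi = set(chain(chain.from_iterable(get_recursive_neighbors(*b) for b in bugs), bugs))
--         nb = set()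
--         for p in poi:
--             n = len(bugs.intersection(get_recursive_neighbors(*p)))
--             if (p in bugs and n == 1) or (p not in bugs and n in [1, 2]):
--                 nb.add(p)
--         bugs = nb
--     return len(bugs)
-- ===== SOURCE B (Python) =====
-- from collections import Counter
--
--
-- def cell_neighbors(x, y):
--     # per-direction recursive neighbor rule: step off the grid -> the adjacent
--     # cell of the enclosing level; step onto the center -> the facing edge of
--     # the enclosed level; otherwise the ordinary same-level cell.
--     out = []
--     for dx, dy in ((-1, 0), (1, 0), (0, -1), (0, 1)):
--         nx, ny = x + dx, y + dy
--         if nx < 0 or nx > 4 or ny < 0 or ny > 4: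
--             out.append((2 + dx, 2 + dy, -1))
--         elif (nx, ny) == (2, 2):
--             if dx == 1:
--                 out += [(0, i, 1) for i in range(5)]
--             elif dx == -1:
--                 out += [(4, i, 1) for i in range(5)]
--             elif dy == 1:
--                 out += [(i, 0, 1) for i in range(5)]
--             else:
--                 out += [(i, 4, 1) for i in range(5)]
--         else:
--             out.append((nx, ny, 0))
--     return out
--
--
-- def part2(inp):
--     bugs = {(divmod(i, 5)[1], divmod(i, 5)[0], 0) for i, c in enumerate(inp) if c == '#'}
--     for _ in range(200):
--         cnt = Counter((nx, ny, d + dd) for x, y, d in bugs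
--                       for nx, ny, dd in cell_neighbors(x, y))
--         bugs = {p for p in cnt.keys() | bugs
--                 if cnt[p] == 1 or (cnt[p] == 2 and p not in bugs)}
--     return len(bugs)
-- ===== Notes on version B (the rewrite author's own statement) =====
-- stated objective: alternative
-- what changed: B replaces A's gather step (build a point-of-interest set and, for every candidate, recompute its neighbor list and intersect it with the bug set) by one scatter pass: a per-direction neighbor function (structured by the four step directions with out-of-grid/center cases, instead of A's filter-then-conditional-appends) feeds a Counter that adds 1 at each recursive neighbor of each bug, and the next generation is read off the Counter united with the current bugs, relying on symmetry of the neighbor relation; …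
-- outside the precondition, e.g. on part2('#...........#'): A returns 2006, B returns 2080; on part2('#........................#'): A returns 2006, B returns 1975
import Mathlib
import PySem

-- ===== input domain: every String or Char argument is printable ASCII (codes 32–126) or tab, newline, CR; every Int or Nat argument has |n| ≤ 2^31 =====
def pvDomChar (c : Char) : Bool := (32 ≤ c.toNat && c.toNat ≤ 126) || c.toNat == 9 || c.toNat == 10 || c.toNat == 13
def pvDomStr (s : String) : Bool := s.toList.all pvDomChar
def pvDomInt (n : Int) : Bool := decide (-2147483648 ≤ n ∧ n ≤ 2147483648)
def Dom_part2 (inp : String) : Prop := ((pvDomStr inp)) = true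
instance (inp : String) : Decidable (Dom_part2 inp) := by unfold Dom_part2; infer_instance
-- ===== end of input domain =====

-- B replaces A's per-candidate neighbor-list intersection with a per-direction neighbor rule feeding
-- one Counter scatter pass per step (an alternative decomposition of similar cost; it relies on
-- symmetry of the recursive neighbor relation on the grid).


-- ===== PORT A =====
-- the filter lambda of get_recursive_neighbors
def nbrsP (c : Int × Int × Int) : Bool :=
  decide (0 ≤ c.1) && decide (c.1 < 5) && decide (0 ≤ c.2.1) && decide (c.2.1 < 5)
    && !((c.1, c.2.1) == ((2 : Int), (2 : Int)))

-- A's get_recursive_neighbors; each 'if …: neighbors.append/+= …' appends a conditional segment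
def nbrs (x y d : Int) : List (Int × Int × Int) :=
  ([(x - 1, y, d), (x + 1, y, d), (x, y - 1, d), (x, y + 1, d)]).filter nbrsP
    ++ (if x = 0 then [((1 : Int), (2 : Int), d - 1)] else [])
    ++ (if x = 4 then [((3 : Int), (2 : Int), d - 1)] else [])
    ++ (if y = 0 then [((2 : Int), (1 : Int), d - 1)] else [])
    ++ (if y = 4 then [((2 : Int), (3 : Int), d - 1)] else [])
    ++ (if x = 2 ∧ y = 1 then (PySem.List.pyRange 0 5 1).map (fun i => (i, 0, d + 1)) else [])
    ++ (if x = 2 ∧ y = 3 then (PySem.List.pyRange 0 5 1).map (fun i => (i, 4, d + 1)) else [])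
    ++ (if x = 1 ∧ y = 2 then (PySem.List.pyRange 0 5 1).map (fun i => (0, i, d + 1)) else [])
    ++ (if x = 3 ∧ y = 2 then (PySem.List.pyRange 0 5 1).map (fun i => (4, i, d + 1)) else [])

-- get_recursive_neighbors(*b) on a tuple b
def nbrsT (b : Int × Int × Int) : List (Int × Int × Int) := nbrs b.1 b.2.1 b.2.2

-- one iteration of A's "for _ in range(200)" body
def stepA (bugs : PySem.Set (Int × Int × Int)) : PySem.Set (Int × Int × Int) :=
  let poi : PySem.Set (Int × Int × Int) := PySem.Set.ofList (bugs.flatMap nbrsT ++ bugs)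
  poi.foldl (fun nb p =>
      if (PySem.Set.contains bugs p && (PySem.Set.inter bugs (nbrsT p)).length == 1)
         || (!PySem.Set.contains bugs p
             && ((PySem.Set.inter bugs (nbrsT p)).length == 1
                 || (PySem.Set.inter bugs (nbrsT p)).length == 2)) then PySem.Set.add nb p else nb)
    PySem.Set.empty

-- {(i % 5, i // 5, 0) for i, c in enumerate(inp) if c == '#'}
def initBugs (inp : String) : PySem.Set (Int × Int × Int) :=
  PySem.Set.ofList
    (((PySem.List.enumerate inp.toList 0).filter (fun p => p.2 == '#')).map
      (fun p => (PySem.Int.mod p.1 5, PySem.Int.floordiv p.1 5, (0 : Int))))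

def part2 (inp : String) : Int :=
  let bugs := initBugs inp
  let bugs := (PySem.List.pyRange 0 200 1).foldl (fun bugs _ => stepA bugs) bugs
  (bugs.length : Int)

-- ===== PORT B =====
-- the body of B's direction loop: one step (dx,dy) from cell (x,y)
def dirStep (x y : Int) (dxy : Int × Int) : List (Int × Int × Int) :=
  let nx := x + dxy.1
  let ny := y + dxy.2
  if nx < 0 ∨ nx > 4 ∨ ny < 0 ∨ ny > 4 then [(2 + dxy.1, 2 + dxy.2, -1)]
  else if nx = 2 ∧ ny = 2 then
    (if dxy.1 = 1 then (PySem.List.pyRange 0 5 1).map (fun i => ((0 : Int), i, (1 : Int)))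
     else if dxy.1 = -1 then (PySem.List.pyRange 0 5 1).map (fun i => ((4 : Int), i, (1 : Int)))
     else if dxy.2 = 1 then (PySem.List.pyRange 0 5 1).map (fun i => (i, (0 : Int), (1 : Int)))
     else (PySem.List.pyRange 0 5 1).map (fun i => (i, (4 : Int), (1 : Int))))
  else [(nx, ny, 0)]

-- B's cell_neighbors: accumulate over the four directions
def cellNbrs (x y : Int) : List (Int × Int × Int) :=
  ([((-1 : Int), (0 : Int)), (1, 0), (0, -1), (0, 1)]).flatMap (dirStep x y)

-- the generator expression's per-bug contribution: (nx, ny, d + dd)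
def scatter (b : Int × Int × Int) : List (Int × Int × Int) :=
  (cellNbrs b.1 b.2.1).map (fun q => (q.1, q.2.1, b.2.2 + q.2.2))

-- one iteration of B's loop body: Counter scatter, then a set comprehension over keys | bugs
def stepB (bugs : PySem.Set (Int × Int × Int)) : PySem.Set (Int × Int × Int) :=
  let cnt : PySem.Dict (Int × Int × Int) Int := PySem.Dict.counter (bugs.flatMap scatter)
  (PySem.Set.union (PySem.Set.ofList (PySem.Dict.keys cnt)) bugs).filter
    (fun p => cnt.getD p 0 == 1 || (cnt.getD p 0 == 2 && !(PySem.Set.contains bugs p)))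

-- {(divmod(i,5)[1], divmod(i,5)[0], 0) for i, c in enumerate(inp) if c == '#'}  (divmod: 5 ≠ 0, so getD is never the default)
def initBugsB (inp : String) : PySem.Set (Int × Int × Int) :=
  PySem.Set.ofList
    (((PySem.List.enumerate inp.toList 0).filter (fun p => p.2 == '#')).map
      (fun p => (((PySem.Int.divmod? p.1 5).getD (0, 0)).2,
                 ((PySem.Int.divmod? p.1 5).getD (0, 0)).1, (0 : Int))))

def part2_alt (inp : String) : Int :=
  let bugs := initBugsB inp
  let bugs := (PySem.List.pyRange 0 200 1).foldl (fun bugs _ => stepB bugs) bugs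
  (bugs.length : Int)

-- ===== PRECONDITION & SPEC =====
-- Pre_ excludes inputs with a live-cell marker at an index ≥ 25 (off the 5×5 grid) or at index 12
-- (the recursive-center tile): such phantom cells see in-grid neighbors that can never see them
-- back, a corner the puzzle's recursive geometry leaves undefined, with two defensible treatments.
def Pre_part2 (inp : String) : Prop :=
  ∀ (i : Nat), i < inp.toList.length → inp.toList[i]! = '#' → i < 25 ∧ i ≠ 12

instance (inp : String) : Decidable (Pre_part2 inp) := by unfold Pre_part2; infer_instance

def pvWitness_part2 : String := "##.#.....#..."

def Spec_part2 (inp : String) (out : Int) : Prop := out = part2_alt inp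
instance (inp : String) (out : Int) : Decidable (Spec_part2 inp out) := by unfold Spec_part2; infer_instance

-- ===== CLAIM (what is proved, stated in full; the proofs are below) =====
def Claim_equal_part2 : Prop := ∀ (inp : String), Dom_part2 inp → Pre_part2 inp → Spec_part2 inp (part2 inp)

-- ===== LEMMAS AND PROOFS =====

-- in-grid cells (third component irrelevant)
def inGridB (p : Int × Int × Int) : Bool :=
  decide (0 ≤ p.1) && decide (p.1 < 5) && decide (0 ≤ p.2.1) && decide (p.2.1 < 5)
    && !(p.1 == 2 && p.2.1 == 2)

def grid5 : List Int := [0, 1, 2, 3, 4]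

lemma cand_shift (x y d : Int) :
    ([(x - 1, y, d), (x + 1, y, d), (x, y - 1, d), (x, y + 1, d)] : List (Int × Int × Int)).filter nbrsP
    = (([(x - 1, y, 0), (x + 1, y, 0), (x, y - 1, 0), (x, y + 1, 0)] : List (Int × Int × Int)).filter nbrsP).map
        (fun q => (q.1, q.2.1, q.2.2 + d)) := by
  simp only [List.filter_cons, List.filter_nil, nbrsP]
  norm_num
  split_ifs <;> simp

-- nbrs at depth d is nbrs at depth 0 shifted by d
lemma nbrs_shift (x y d : Int) :
    nbrs x y d = (nbrs x y 0).map (fun q => (q.1, q.2.1, q.2.2 + d)) := by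
  simp only [nbrs, List.map_append,
    apply_ite (List.map (fun q : Int × Int × Int => (q.1, q.2.1, q.2.2 + d)))]
  rw [cand_shift]
  congr 1 <;> [skip; (split_ifs <;> simp [List.map_map, Function.comp, add_comm d 1])]
  congr 1 <;> [skip; (split_ifs <;> simp [List.map_map, Function.comp, add_comm d 1])]
  congr 1 <;> [skip; (split_ifs <;> simp [List.map_map, Function.comp, add_comm d 1])]
  congr 1 <;> [skip; (split_ifs <;> simp [List.map_map, Function.comp, add_comm d 1])]
  congr 1 <;> [skip; (split_ifs <;> simp [sub_eq_neg_add])]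
  congr 1 <;> [skip; (split_ifs <;> simp [sub_eq_neg_add])]
  congr 1 <;> (split_ifs <;> simp [sub_eq_neg_add])

-- scatter at depth d is scatter at depth 0 shifted by d
lemma scatter_shift (x y d : Int) :
    scatter (x, y, d) = (scatter (x, y, 0)).map (fun q => (q.1, q.2.1, q.2.2 + d)) := by
  simp only [scatter, List.map_map]
  refine List.map_congr_left ?_
  intro q _
  simp [Function.comp]
  ring

-- B's scatter list from an in-grid cell is a permutation of A's neighbor list (checked at depth 0)
lemma core_scatter : (grid5.all fun x => grid5.all fun y =>
    !(inGridB (x, y, 0)) || decide ((scatter (x, y, 0)).Perm (nbrs x y 0))) = true := by decide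

-- symmetry of the neighbor relation between in-grid cells, checked at depth 0
lemma core_sym : (grid5.all fun x => grid5.all fun y => grid5.all fun a => grid5.all fun b =>
    !(inGridB (x, y, 0)) || !(inGridB (a, b, 0)) ||
    (([-1, 0, 1] : List Int).all fun e =>
      decide ((a, b, e) ∈ nbrs x y 0) == decide ((x, y, -e) ∈ nbrs a b 0))) = true := by decide

lemma core_dbound : (grid5.all fun x => grid5.all fun y => (nbrs x y 0).all fun q =>
    decide (q.2.2 = -1 ∨ q.2.2 = 0 ∨ q.2.2 = 1)) = true := by decide

lemma core_grid : (grid5.all fun x => grid5.all fun y => (nbrs x y 0).all fun q =>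
    inGridB q) = true := by decide

lemma core_nodup : (grid5.all fun x => grid5.all fun y =>
    decide ((nbrs x y 0).Nodup)) = true := by decide

lemma inGridB_elim {p : Int × Int × Int} (h : inGridB p = true) :
    p.1 ∈ grid5 ∧ p.2.1 ∈ grid5 ∧ inGridB (p.1, p.2.1, 0) = true := by
  obtain ⟨a, b, c⟩ := p
  simp [inGridB] at h ⊢
  simp [grid5]
  omega

lemma inGridB_third {a b c c' : Int} : inGridB (a, b, c) = inGridB (a, b, c') := by
  simp [inGridB]

lemma shift_inj (d : Int) :
    Function.Injective (fun q : Int × Int × Int => (q.1, q.2.1, q.2.2 + d)) := by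
  rintro ⟨a1, a2, a3⟩ ⟨b1, b2, b3⟩ h
  simp [Prod.ext_iff] at h ⊢
  omega

lemma mem_nbrs_shift {q : Int × Int × Int} {x y d : Int} :
    q ∈ nbrs x y d ↔ (q.1, q.2.1, q.2.2 - d) ∈ nbrs x y 0 := by
  rw [nbrs_shift x y d]
  constructor
  · intro h
    obtain ⟨r, hr, he⟩ := List.mem_map.mp h
    obtain ⟨r1, r2, r3⟩ := r
    obtain ⟨a, b, c⟩ := q
    simp only [Prod.mk.injEq] at he
    obtain ⟨h1, h2, h3⟩ := he
    subst h1; subst h2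
    have hc : c - d = r3 := by omega
    simpa only [hc] using hr
  · intro h
    refine List.mem_map.mpr ⟨(q.1, q.2.1, q.2.2 - d), h, ?_⟩
    obtain ⟨a, b, c⟩ := q
    simp

lemma nodup_nbrs {x y : Int} (hx : x ∈ grid5) (hy : y ∈ grid5) (d : Int) :
    (nbrs x y d).Nodup := by
  rw [nbrs_shift]
  apply List.Nodup.map (shift_inj d)
  have := core_nodup
  simp [List.all_eq_true] at this
  exact this x hx y hy

-- B's scatter from an in-grid bug is a permutation of A's neighbor list at every depth
lemma scatter_perm {x y : Int} (hx : x ∈ grid5) (hy : y ∈ grid5)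
    (h0 : inGridB (x, y, 0) = true) (d : Int) : (scatter (x, y, d)).Perm (nbrs x y d) := by
  rw [scatter_shift, nbrs_shift]
  have h := core_scatter
  simp only [List.all_eq_true] at h
  have := h x hx y hy
  rw [h0] at this
  simp only [Bool.not_true, Bool.false_or, decide_eq_true_eq] at this
  exact this.map _

lemma grid_of_mem_nbrs {x y d : Int} (hx : x ∈ grid5) (hy : y ∈ grid5)
    {q : Int × Int × Int} (hq : q ∈ nbrs x y d) : inGridB q = true := by
  obtain ⟨a, b, c⟩ := q
  have h0 : (a, b, c - d) ∈ nbrs x y 0 := by simpa using mem_nbrs_shift.mp hq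
  have hg := core_grid
  simp only [List.all_eq_true] at hg
  have := hg x hx y hy (a, b, c - d) h0
  rwa [inGridB_third (c := c - d) (c' := c)] at this

lemma dbound_of_mem {x y a b e : Int} (hx : x ∈ grid5) (hy : y ∈ grid5)
    (hq : (a, b, e) ∈ nbrs x y 0) : e = -1 ∨ e = 0 ∨ e = 1 := by
  have h := core_dbound
  simp only [List.all_eq_true] at h
  have := h x hx y hy (a, b, e) hq
  simpa using this

lemma nbrsT_symm {p q : Int × Int × Int} (hp : inGridB p = true) (hq : inGridB q = true) :
    q ∈ nbrsT p ↔ p ∈ nbrsT q := by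
  obtain ⟨x, y, d⟩ := p
  obtain ⟨a, b, e⟩ := q
  obtain ⟨hx, hy, hp0⟩ := inGridB_elim hp
  obtain ⟨ha, hb, hq0⟩ := inGridB_elim hq
  simp only [nbrsT]
  have hL : ((a, b, e) ∈ nbrs x y d) ↔ ((a, b, e - d) ∈ nbrs x y 0) := by
    constructor
    · intro h; simpa using mem_nbrs_shift.mp h
    · intro h; apply mem_nbrs_shift.mpr; simpa using h
  have hR : ((x, y, d) ∈ nbrs a b e) ↔ ((x, y, d - e) ∈ nbrs a b 0) := by
    constructor
    · intro h; simpa using mem_nbrs_shift.mp h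
    · intro h; apply mem_nbrs_shift.mpr; simpa using h
  rw [hL, hR]
  simp only [grid5, List.mem_cons, List.not_mem_nil, or_false] at hx hy ha hb hp0 hq0
  by_cases he : e - d = -1 ∨ e - d = 0 ∨ e - d = 1
  · have hs := core_sym
    simp only [List.all_eq_true] at hs
    have h1 := hs x (by simp [grid5]; tauto) y (by simp [grid5]; tauto) a (by simp [grid5]; tauto) b (by simp [grid5]; tauto)
    simp only [hp0, hq0, Bool.not_true, Bool.false_or] at h1
    have h2 : decide ((a, b, e - d) ∈ nbrs x y 0) == decide ((x, y, -(e - d)) ∈ nbrs a b 0) := by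
      simp only [List.all_eq_true] at h1
      exact h1 (e - d) (by rcases he with h | h | h <;> simp [h])
    have h3 : decide ((a, b, e - d) ∈ nbrs x y 0) = decide ((x, y, -(e - d)) ∈ nbrs a b 0) := by
      simpa using h2
    have hde : d - e = -(e - d) := by ring
    rw [hde]
    constructor <;> intro hmm
    · have := h3 ▸ (decide_eq_true hmm); exact of_decide_eq_true (by simpa using this)
    · have := h3.symm ▸ (decide_eq_true hmm); exact of_decide_eq_true (by simpa using this)
  · constructor <;> intro hm
    · exact absurd (dbound_of_mem (by simp [grid5]; tauto) (by simp [grid5]; tauto) hm) (by simpa using he)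
    · have := dbound_of_mem (x := a) (y := b) (by simp [grid5]; tauto) (by simp [grid5]; tauto) hm
      omega

-- count of p in B's scattered multiset = number of live cells adjacent to p
lemma count_flatMap (S : List (Int × Int × Int)) (hG : ∀ b ∈ S, inGridB b = true)
    (p : Int × Int × Int) (hp : inGridB p = true) :
    List.count p (S.flatMap scatter) = S.countP (fun b => decide (b ∈ nbrsT p)) := by
  induction S with
  | nil => simp
  | cons b t ih =>
    have hb : inGridB b = true := hG b (by simp)
    have ht : ∀ x ∈ t, inGridB x = true := fun x hx => hG x (by simp [hx])
    obtain ⟨hbx, hby, hb0⟩ := inGridB_elim hb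
    have hnd : (nbrsT b).Nodup := nodup_nbrs hbx hby _
    have hscat : List.count p (scatter b) = List.count p (nbrsT b) := by
      obtain ⟨x, y, d⟩ := b
      exact (scatter_perm hbx hby hb0 d).count_eq p
    have hcount : List.count p (nbrsT b) = if p ∈ nbrsT b then 1 else 0 := by
      split_ifs with hm
      · exact List.count_eq_one_of_mem hnd hm
      · exact List.count_eq_zero_of_not_mem hm
    have hsym : (p ∈ nbrsT b) ↔ (b ∈ nbrsT p) := nbrsT_symm hb hp
    simp only [List.flatMap_cons, List.count_append, List.countP_cons, ih ht, hscat, hcount]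
    by_cases hm : b ∈ nbrsT p
    · simp [hsym.mpr hm, hm]; omega
    · have hm' : p ∉ nbrsT b := fun h => hm (hsym.mp h)
      simp [hm, hm']

lemma interLen (S : List (Int × Int × Int)) (p : Int × Int × Int) :
    (PySem.Set.inter S (nbrsT p)).length = S.countP (fun b => decide (b ∈ nbrsT p)) := by
  simp only [PySem.Set.inter, ← List.countP_eq_length_filter]
  apply List.countP_congr
  intro b _
  simp [PySem.Set.contains]

lemma foldl_add_filter {α : Type} [BEq α] [LawfulBEq α] (cond : α → Bool)
    (l : List α) (s : PySem.Set α) (hl : l.Nodup) (hdisj : ∀ x ∈ l, x ∉ s) :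
    l.foldl (fun nb p => if cond p then PySem.Set.add nb p else nb) s = s ++ l.filter cond := by
  induction l generalizing s with
  | nil => simp
  | cons x t ih =>
    have hx : x ∉ s := hdisj x (by simp)
    have hnd : t.Nodup := hl.of_cons
    have hxt : x ∉ t := (List.nodup_cons.mp hl).1
    by_cases hc : cond x = true
    · have hadd : PySem.Set.add s x = s ++ [x] := by
        have hcont : PySem.Set.contains s x = false := by
          rw [Bool.eq_false_iff]
          intro hmem
          exact hx ((PySem.Set.contains_iff s x).mp hmem)
        simp [PySem.Set.add, hx]
      have hdisj' : ∀ y ∈ t, y ∉ s ++ [x] := by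
        intro y hy
        simp only [List.mem_append, List.mem_singleton]
        rintro (hys | rfl)
        · exact hdisj y (by simp [hy]) hys
        · exact hxt hy
      rw [List.foldl_cons]
      have hstep : (if cond x = true then PySem.Set.add s x else s) = s ++ [x] := by
        rw [if_pos hc, hadd]
      rw [hstep, ih (s ++ [x]) hnd hdisj']
      simp [hc]
    · have hdisj' : ∀ y ∈ t, y ∉ s := fun y hy => hdisj y (by simp [hy])
      rw [List.foldl_cons]
      have hstep : (if cond x = true then PySem.Set.add s x else s) = s := by
        rw [if_neg (by simp [hc])]
      rw [hstep, ih s hnd hdisj']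
      simp [hc]

-- invariant carried through the 200 iterations
def GoodPair (S S' : List (Int × Int × Int)) : Prop :=
  S.Nodup ∧ S'.Nodup ∧ (∀ p, p ∈ S ↔ p ∈ S') ∧ (∀ b ∈ S, inGridB b = true)

lemma step_pres {S S' : List (Int × Int × Int)} (h : GoodPair S S') :
    GoodPair (stepA S) (stepB S') := by
  obtain ⟨hS, hS', hmem, hG⟩ := h
  have hG' : ∀ b ∈ S', inGridB b = true := fun b hb => hG b ((hmem b).mpr hb)
  have hperm : S.Perm S' := (List.perm_ext_iff_of_nodup hS hS').mpr hmem
  set condA : Int × Int × Int → Bool := fun p =>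
      (PySem.Set.contains S p && (PySem.Set.inter S (nbrsT p)).length == 1)
        || (!PySem.Set.contains S p
            && ((PySem.Set.inter S (nbrsT p)).length == 1
                || (PySem.Set.inter S (nbrsT p)).length == 2)) with hcondA
  set condB : Int × Int × Int → Bool := fun p =>
      (PySem.Dict.counter (S'.flatMap scatter)).getD p 0 == 1
        || ((PySem.Dict.counter (S'.flatMap scatter)).getD p 0 == 2
            && !(PySem.Set.contains S' p)) with hcondB
  have hstepA : stepA S = (PySem.Set.ofList (S.flatMap nbrsT ++ S)).filter condA := by
    simp only [stepA, hcondA]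
    rw [foldl_add_filter _ _ _ (PySem.Set.nodup_ofList _) (by intro x _ hx; simp [PySem.Set.empty] at hx)]
    simp [PySem.Set.empty]
  have hstepB : stepB S' = (PySem.Set.union
      (PySem.Set.ofList ((PySem.Dict.counter (S'.flatMap scatter)).keys)) S').filter condB := by
    simp only [stepB, hcondB]
  -- the two gather sets have the same membership
  have hpoi : ∀ p : Int × Int × Int,
      (p ∈ PySem.Set.ofList (S.flatMap nbrsT ++ S) ↔
        p ∈ PySem.Set.union (PySem.Set.ofList ((PySem.Dict.counter (S'.flatMap scatter)).keys)) S') := by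
    intro p
    rw [PySem.Set.mem_ofList, PySem.Set.mem_union, PySem.Set.mem_ofList,
      PySem.Dict.keys_counter, PySem.Set.mem_ofList, List.mem_append]
    have hiff : (p ∈ S.flatMap nbrsT) ↔ (p ∈ S'.flatMap scatter) := by
      constructor
      · intro hf
        obtain ⟨b, hb, hpb⟩ := List.mem_flatMap.mp hf
        obtain ⟨hbx, hby, hb0⟩ := inGridB_elim (hG b hb)
        obtain ⟨x, y, d⟩ := b
        refine List.mem_flatMap.mpr ⟨(x, y, d), (hmem _).mp hb, ?_⟩
        exact ((scatter_perm hbx hby hb0 d).mem_iff).mpr hpb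
      · intro hf
        obtain ⟨b, hb, hpb⟩ := List.mem_flatMap.mp hf
        obtain ⟨hbx, hby, hb0⟩ := inGridB_elim (hG' b hb)
        obtain ⟨x, y, d⟩ := b
        refine List.mem_flatMap.mpr ⟨(x, y, d), (hmem _).mpr hb, ?_⟩
        exact ((scatter_perm hbx hby hb0 d).mem_iff).mp hpb
    constructor <;> rintro (hf | hs)
    · exact Or.inl (hiff.mp hf)
    · exact Or.inr ((hmem p).mp hs)
    · exact Or.inl (hiff.mpr hf)
    · exact Or.inr ((hmem p).mpr hs)
  -- gathered cells are in the grid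
  have hgridpoi : ∀ p : Int × Int × Int, p ∈ PySem.Set.ofList (S.flatMap nbrsT ++ S) →
      inGridB p = true := by
    intro p hp
    rw [PySem.Set.mem_ofList, List.mem_append] at hp
    rcases hp with hf | hs
    · obtain ⟨b, hb, hpb⟩ := List.mem_flatMap.mp hf
      obtain ⟨hbx, hby, _⟩ := inGridB_elim (hG b hb)
      exact grid_of_mem_nbrs hbx hby hpb
    · exact hG p hs
  -- the two liveness conditions agree on in-grid cells
  have hcond : ∀ p : Int × Int × Int, inGridB p = true → condA p = condB p := by
    intro p hp
    have hcount : (PySem.Dict.counter (S'.flatMap scatter)).getD p 0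
        = ((PySem.Set.inter S (nbrsT p)).length : Int) := by
      rw [PySem.Dict.getD_counter, count_flatMap S' hG' p hp, interLen S p,
        hperm.countP_eq]
    have hcontains : PySem.Set.contains S p = PySem.Set.contains S' p := by
      by_cases hpS : p ∈ S
      · rw [(PySem.Set.contains_iff _ _).mpr hpS, (PySem.Set.contains_iff _ _).mpr ((hmem p).mp hpS)]
      · have h1 : PySem.Set.contains S p = false := by
          rw [Bool.eq_false_iff]; exact fun hc => hpS ((PySem.Set.contains_iff _ _).mp hc)
        have h2 : PySem.Set.contains S' p = false := by
          rw [Bool.eq_false_iff]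
          exact fun hc => hpS ((hmem p).mpr ((PySem.Set.contains_iff _ _).mp hc))
        rw [h1, h2]
    rw [hcondA, hcondB]
    simp only [hcount, ← hcontains]
    rw [Bool.eq_iff_iff]
    set n := (PySem.Set.inter S (nbrsT p)).length with hn
    by_cases hpS : p ∈ S
    · rw [(PySem.Set.contains_iff _ _).mpr hpS]
      simp only [Bool.true_and, Bool.not_true, Bool.false_and, Bool.or_false, Bool.or_eq_true,
        Bool.and_eq_true, beq_iff_eq]
      constructor
      · intro h1; exact Or.inl (by exact_mod_cast h1)
      · rintro (h1 | ⟨h2, hfalse⟩)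
        · exact_mod_cast h1
        · simp at hfalse
    · have h1 : PySem.Set.contains S p = false := by
        rw [Bool.eq_false_iff]; exact fun hc => hpS ((PySem.Set.contains_iff _ _).mp hc)
      rw [h1]
      simp only [Bool.false_and, Bool.not_false, Bool.true_and, Bool.false_or, Bool.or_eq_true,
        Bool.and_eq_true, beq_iff_eq]
      constructor
      · rintro (hn1 | hn2)
        · exact Or.inl (by exact_mod_cast hn1)
        · exact Or.inr ⟨by exact_mod_cast hn2, trivial⟩
      · rintro (hn1 | ⟨hn2, _⟩)
        · exact Or.inl (by exact_mod_cast hn1)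
        · exact Or.inr (by exact_mod_cast hn2)
  refine ⟨?_, ?_, ?_, ?_⟩
  · rw [hstepA]; exact (PySem.Set.nodup_ofList _).filter _
  · rw [hstepB]
    exact (PySem.Set.nodup_union _ _ (PySem.Set.nodup_ofList _)).filter _
  · intro p
    rw [hstepA, hstepB, List.mem_filter, List.mem_filter]
    constructor
    · rintro ⟨hin, hca⟩
      exact ⟨(hpoi p).mp hin, by rw [← hcond p (hgridpoi p hin)]; exact hca⟩
    · rintro ⟨hin, hcb⟩
      have hin' := (hpoi p).mpr hin
      exact ⟨hin', by rw [hcond p (hgridpoi p hin')]; exact hcb⟩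
  · intro b hb
    rw [hstepA, List.mem_filter] at hb
    exact hgridpoi b hb.1

lemma iter_pres (l : List Int) {S S' : List (Int × Int × Int)} (h : GoodPair S S') :
    GoodPair (l.foldl (fun b _ => stepA b) S) (l.foldl (fun b _ => stepB b) S') := by
  induction l generalizing S S' with
  | nil => exact h
  | cons x t ih => exact ih (step_pres h)

-- B's divmod init builds the same list as A's mod/floordiv init
lemma initB_eq (inp : String) : initBugsB inp = initBugs inp := by
  simp only [initBugsB, initBugs]
  congr 1

lemma init_good (inp : String) (hpre : Pre_part2 inp) : GoodPair (initBugs inp) (initBugsB inp) := by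
  rw [initB_eq]
  refine ⟨PySem.Set.nodup_ofList _, PySem.Set.nodup_ofList _, fun p => Iff.rfl, ?_⟩
  intro b hb
  simp only [initBugs] at hb
  rw [PySem.Set.mem_ofList] at hb
  obtain ⟨⟨i, c⟩, hmem, rfl⟩ := List.mem_map.mp hb
  rw [List.mem_filter] at hmem
  obtain ⟨henum, hc⟩ := hmem
  obtain ⟨k, hk, hik⟩ := (PySem.List.mem_enumerate_iff _ _ _).mp henum
  simp only [Prod.ext_iff] at hik
  obtain ⟨hi, hcc⟩ := hik
  have hch : inp.toList[k]! = '#' := by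
    have hgl : inp.toList[k]! = inp.toList[k] := getElem!_pos inp.toList k hk
    rw [hgl, ← hcc]
    simpa using hc
  obtain ⟨hk25, hk12⟩ := hpre k hk hch
  have hi' : i = (k : Int) := by omega
  subst hi'
  have h5 : (0 : Int) < 5 := by norm_num
  have hm0 : 0 ≤ PySem.Int.mod (k : Int) 5 := PySem.Int.mod_nonneg _ h5
  have hm5 : PySem.Int.mod (k : Int) 5 < 5 := PySem.Int.mod_lt _ h5
  have hd0 : 0 ≤ PySem.Int.floordiv (k : Int) 5 := by
    rw [PySem.Int.le_floordiv_iff_mul_le h5]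
    positivity
  have hd5 : PySem.Int.floordiv (k : Int) 5 < 5 := by
    rw [PySem.Int.floordiv_lt_iff_lt_mul h5]
    exact_mod_cast by omega
  have hsum := PySem.Int.floordiv_mul_add_mod (k : Int) 5
  have hk12' : (k : Int) ≠ 12 := by exact_mod_cast fun h => hk12 (by exact_mod_cast h)
  simp only [inGridB]
  simp only [Bool.and_eq_true, decide_eq_true_eq, Bool.not_eq_true', Bool.and_eq_false_iff,
    beq_eq_false_iff_ne, ne_eq]
  refine ⟨⟨⟨⟨hm0, hm5⟩, hd0⟩, hd5⟩, ?_⟩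
  by_cases hm2 : PySem.Int.mod (k : Int) 5 = 2
  · right
    intro hf2
    apply hk12'
    omega
  · left
    exact hm2

theorem length_eq_of_good {S S' : List (Int × Int × Int)} (h : GoodPair S S') :
    S.length = S'.length := by
  obtain ⟨h1, h2, h3, _⟩ := h
  exact ((List.perm_ext_iff_of_nodup h1 h2).mpr h3).length_eq

-- ===== VERDICT (by name: the statement is the Claim_ definition above) =====
theorem part2_spec : Claim_equal_part2 := by
  intro inp _ hpre
  unfold Spec_part2 part2 part2_alt
  have h := iter_pres (PySem.List.pyRange 0 200 1) (init_good inp hpre)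
  exact congrArg Int.ofNat (length_eq_of_good h)
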